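-- pv_equiv track=rewrite | github.com/rf-iasys/OEIS | OEIS_A005476.py | A005476
-- ===== SOURCE A (Python) =====
-- def A005476(n):
--     marked = []
--     current = 1
--     k = 3
--
--     while len(marked) < n:
--         k += current - 4
--         current += 5
--         marked.append(k)
--
--     return marked
-- ===== SOURCE B (Python) =====
-- def A005476(n):
--     return [i * (5 * i - 1) // 2 for i in range(n)]
-- ===== Notes on version B (the rewrite author's own statement) =====
-- stated objective: simpler
-- what changed: Replaced the stateful while-loop maintaining running accumulators `current` and `k` with a one-line closed-form list comprehension term(i) = i*(5*i-1)//2 over range(n).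
import Mathlib
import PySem

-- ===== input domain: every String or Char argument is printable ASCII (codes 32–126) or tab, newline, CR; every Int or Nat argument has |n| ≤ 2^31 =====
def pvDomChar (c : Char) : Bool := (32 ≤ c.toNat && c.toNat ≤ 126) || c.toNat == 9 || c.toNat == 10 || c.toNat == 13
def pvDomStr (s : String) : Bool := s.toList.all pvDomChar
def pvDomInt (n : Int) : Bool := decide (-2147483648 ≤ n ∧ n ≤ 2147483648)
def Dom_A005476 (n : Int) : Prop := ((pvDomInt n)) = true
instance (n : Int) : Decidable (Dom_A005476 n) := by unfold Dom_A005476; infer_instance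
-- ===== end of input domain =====

-- B replaces A's stateful incremental while-loop with the closed form i*(5*i-1)//2 per index (simpler).

-- ===== PORT A =====
-- while len(marked) < n: k += current - 4; current += 5; marked.append(k)
def A005476.loop (n : Int) (marked : List Int) (current k : Int) : List Int :=
  if (marked.length : Int) < n then
    A005476.loop n (marked ++ [k + (current - 4)]) (current + 5) (k + (current - 4))
  else marked
termination_by (n - marked.length).toNat
decreasing_by simp; omega

def A005476 (n : Int) : List Int :=
  A005476.loop n [] 1 3

-- ===== PORT B =====
def A005476_alt (n : Int) : List Int :=
  (PySem.List.pyRange 0 n 1).map (fun i => PySem.Int.floordiv (i * (5 * i - 1)) 2)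

-- ===== PRECONDITION & SPEC =====
def Spec_A005476 (n : Int) (out : List Int) : Prop := out = A005476_alt n
instance (n : Int) (out : List Int) : Decidable (Spec_A005476 n out) := by unfold Spec_A005476; infer_instance

-- ===== CLAIM (what is proved, stated in full; the proofs are below) =====
def Claim_equal_A005476 : Prop := ∀ (n : Int), Dom_A005476 n → Spec_A005476 n (A005476 n)

-- ===== LEMMAS AND PROOFS =====

theorem A005476_term_closed (i k : Int) (hk : 2 * k = i * (5 * i - 1)) :
    PySem.Int.floordiv (i * (5 * i - 1)) 2 = k := by
  rw [← hk, PySem.Int.floordiv_eq_ediv_of_pos (by omega)]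
  omega

-- loop invariant: with current = 1 + 5*i, 2*k = (i-1)*(5*i-6), the loop appends the
-- closed-form terms for indices i, i+1, …, n-1.
theorem A005476_loop_eq (d : Nat) : ∀ (n : Int) (marked : List Int) (i current k : Int),
    (n - marked.length).toNat = d → (marked.length : Int) = i →
    current = 1 + 5 * i → 2 * k = (i - 1) * (5 * i - 6) →
    A005476.loop n marked current k =
      marked ++ (PySem.List.pyRange i n 1).map (fun j => PySem.Int.floordiv (j * (5 * j - 1)) 2) := by
  induction d with
  | zero =>
    intro n marked i current k hd hi hc hk
    rw [A005476.loop]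
    have hni : n ≤ i := by omega
    rw [if_neg (by omega), PySem.List.pyRange_one_eq_nil hni]
    simp
  | succ d ih =>
    intro n marked i current k hd hi hc hk
    rw [A005476.loop]
    have hin : i < n := by omega
    rw [if_pos (by omega)]
    have hterm : PySem.Int.floordiv (i * (5 * i - 1)) 2 = k + (current - 4) := by
      apply A005476_term_closed; ring_nf; ring_nf at hk; omega
    rw [ih n (marked ++ [k + (current - 4)]) (i + 1) (current + 5) (k + (current - 4))
        (by simp; omega) (by simp; omega) (by omega) (by ring_nf; ring_nf at hk; omega)]
    rw [PySem.List.pyRange_one_cons hin, List.map_cons, hterm]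
    simp

-- ===== VERDICT (by name: the statement is the Claim_ definition above) =====
theorem A005476_spec : Claim_equal_A005476 := by
  intro n _
  unfold Spec_A005476 A005476 A005476_alt
  exact A005476_loop_eq (n - 0).toNat n [] 0 1 3 (by simp) (by simp) (by ring) (by ring)
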